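-- pv_equiv track=rewrite | github.com/INF1007-2023A/chapitre-05-1-efondere | exercice.py | verify_ages
-- ===== SOURCE A (Python) =====
-- from typing import List
--
-- def verify_ages(groups: List[List[int]]) -> List[bool]:
--     def is_group_acceptable(group):
--         if not 4 <= len(group) <= 10:
--             return False
--
--         has_over_70 = False
--         has_exactly_50 = False
--         has_minor = False
--         for member in group:
--             if member == 25:
--                 return True
--             if member < 18:
--                 has_minor = True
--             if member == 50:
--                 has_exactly_50 = True
--             if member > 70:
--                 has_over_70 = True
--
--         if has_minor:
--             return False
--
--         if has_over_70 and has_exactly_50: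
--             return False
--
--         return True
--
--     return [is_group_acceptable(g) for g in groups]
-- ===== SOURCE B (Python) =====
-- from typing import List
--
-- def verify_ages(groups: List[List[int]]) -> List[bool]:
--     def is_group_acceptable(group):
--         if not 4 <= len(group) <= 10:
--             return False
--         if 25 in group:
--             return True
--         if any(m < 18 for m in group):
--             return False
--         if 50 in group and any(m > 70 for m in group):
--             return False
--         return True
--
--     return [is_group_acceptable(g) for g in groups]
-- ===== Notes on version B (the rewrite author's own statement) =====
-- stated objective: simpler
-- what changed: Replaced the single flag-carrying loop (three booleans accumulated, checked after the loop) by a chain of short-circuiting membership/any predicate tests, ordered so the '25 in group' early return keeps precedence.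
import Mathlib
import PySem

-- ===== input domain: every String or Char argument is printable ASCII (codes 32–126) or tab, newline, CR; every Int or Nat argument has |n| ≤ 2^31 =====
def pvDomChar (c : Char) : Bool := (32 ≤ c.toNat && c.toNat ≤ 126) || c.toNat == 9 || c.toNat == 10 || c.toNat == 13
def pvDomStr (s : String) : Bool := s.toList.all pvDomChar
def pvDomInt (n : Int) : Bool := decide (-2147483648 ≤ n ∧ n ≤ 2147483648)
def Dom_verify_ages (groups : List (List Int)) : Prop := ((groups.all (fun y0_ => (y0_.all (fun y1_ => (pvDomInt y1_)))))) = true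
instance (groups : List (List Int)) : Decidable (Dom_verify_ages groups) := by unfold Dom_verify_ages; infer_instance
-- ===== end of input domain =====

-- B rewrites the flag-carrying loop as a chain of short-circuiting predicate tests (simpler decomposition, same cost).


-- ===== PORT A =====
-- the for-loop of is_group_acceptable: three accumulated flags, early return on 25
def pvLoopA (l : List Int) (hasOver70 hasFifty hasMinor : Bool) : Bool :=
  match l with
  | [] =>
      if hasMinor then false
      else if hasOver70 && hasFifty then false
      else true
  | m :: t =>
      if m == 25 then true
      else pvLoopA t (hasOver70 || decide (m > 70)) (hasFifty || decide (m = 50))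
             (hasMinor || decide (m < 18))

def pvIsAcceptableA (group : List Int) : Bool :=
  if !(4 ≤ group.length && group.length ≤ 10) then false
  else pvLoopA group false false false

def verify_ages (groups : List (List Int)) : List Bool :=
  groups.map pvIsAcceptableA

-- ===== PORT B =====
def pvIsAcceptableB (group : List Int) : Bool :=
  if !(4 ≤ group.length && group.length ≤ 10) then false
  else if group.contains 25 then true
  else if group.any (fun m => decide (m < 18)) then false
  else if group.contains 50 && group.any (fun m => decide (m > 70)) then false
  else true

def verify_ages_alt (groups : List (List Int)) : List Bool :=
  groups.map pvIsAcceptableB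

-- ===== PRECONDITION & SPEC =====
def Spec_verify_ages (groups : List (List Int)) (out : List Bool) : Prop := out = verify_ages_alt groups
instance (groups : List (List Int)) (out : List Bool) : Decidable (Spec_verify_ages groups out) := by unfold Spec_verify_ages; infer_instance

-- ===== CLAIM (what is proved, stated in full; the proofs are below) =====
def Claim_equal_verify_ages : Prop := ∀ (groups : List (List Int)), Dom_verify_ages groups → Spec_verify_ages groups (verify_ages groups)

-- ===== LEMMAS AND PROOFS =====
theorem pvLoopA_char (l : List Int) (o f m : Bool) :
    pvLoopA l o f m =
      (if l.contains 25 then true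
       else if m || l.any (fun x => decide (x < 18)) then false
       else if (o || l.any (fun x => decide (x > 70))) && (f || l.contains 50) then false
       else true) := by
  induction l generalizing o f m with
  | nil => simp [pvLoopA]
  | cons a t ih =>
      simp only [pvLoopA, List.contains_cons, List.any_cons]
      by_cases h25 : a = 25
      · subst h25; simp
      · have hb : (a == 25) = false := by simpa using h25
        have hb' : (25 == a) = false := by simpa using fun h => h25 h.symm
        rw [hb, hb', ih]
        simp only [Bool.false_or]
        by_cases hc : t.contains 25
        · rw [hc]; simp
        · have hc' : t.contains 25 = false := by simpa using hc
          have e50 : (50 == a) = decide (a = 50) := by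
            rcases eq_or_ne a 50 with h | h
            · subst h; simp
            · simp [h, Ne.symm h]
          rw [hc', e50]
          simp only [Bool.or_assoc]
          norm_num

theorem pvIsAcceptable_eq (g : List Int) : pvIsAcceptableA g = pvIsAcceptableB g := by
  unfold pvIsAcceptableA pvIsAcceptableB
  rw [pvLoopA_char]
  simp only [Bool.false_or]
  rw [Bool.and_comm (g.any fun x => decide (x > 70)) (g.contains 50)]

-- ===== VERDICT (by name: the statement is the Claim_ definition above) =====
theorem verify_ages_spec : Claim_equal_verify_ages := by
  intro groups _
  unfold Spec_verify_ages verify_ages verify_ages_alt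
  exact List.map_congr_left (fun g _ => pvIsAcceptable_eq g)
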